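-- pv_equiv track=rewrite | github.com/CodecoolMSC2017/kedd | kedd.py | solve
-- ===== SOURCE A (Python) =====
-- def solve(grades):
--     a=[]
--     for grade in grades:
--         if grade <= 38:
--                 a.append(grade)
--         else:
--             if grade % 10 == 7:
--                 a.append(grade)
--             elif grade % 10 == 3:
--                 grade +=2
--                 a.append(grade)
--             elif grade % 10 < 5:
--                 if grade % 5 < 3:
--                     grade-= (grade % 5)
--                 elif grade % 5 > 3:
--                     grade+=1
--                 a.append(grade)
--             elif grade % 10 > 5:
--                 if grade % 5 < 3:
--                     grade-= (grade % 5)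
--                 elif grade % 5 > 3:
--                     grade+=1
--                 elif grade % 5 == 3:
--                     grade+=2
--                 a.append(grade)
--     return a    # Complete this function
-- ===== SOURCE B (Python) =====
-- def _adjust(g):
--     # grades > 38 not ending in 7 are rounded to the nearest multiple of 5
--     # (closed-form arithmetic); a rounded value ending in 5 means "skip".
--     if g <= 38 or g % 10 == 7:
--         return g
--     if g % 10 == 5:
--         return None
--     return 5 * ((g + 2) // 5)
--
-- def solve(grades):
--     out = []
--     for g in grades:
--         r = _adjust(g)
--         if r is not None:
--             out.append(r)
--     return out
-- ===== Notes on version B (the rewrite author's own statement) =====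
-- stated objective: simpler
-- what changed: Replaces A's nested last-digit if/elif cascade with a closed-form round-to-nearest-multiple-of-5 formula 5*((g+2)//5) (with grades ending in 7 kept and grades ending in 5 skipped), computed by a separate total helper returning None for skipped grades.
import Mathlib
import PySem

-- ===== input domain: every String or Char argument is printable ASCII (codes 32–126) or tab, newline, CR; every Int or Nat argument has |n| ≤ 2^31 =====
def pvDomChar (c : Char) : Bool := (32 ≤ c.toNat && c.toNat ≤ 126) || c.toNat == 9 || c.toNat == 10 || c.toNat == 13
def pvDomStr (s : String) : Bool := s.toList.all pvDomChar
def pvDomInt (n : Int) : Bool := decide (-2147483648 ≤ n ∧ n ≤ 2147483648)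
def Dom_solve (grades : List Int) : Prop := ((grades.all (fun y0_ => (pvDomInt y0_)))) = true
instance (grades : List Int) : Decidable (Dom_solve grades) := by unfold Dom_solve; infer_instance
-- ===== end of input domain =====

-- B replaces A's nested last-digit if/elif cascade by a closed-form
-- round-to-nearest-multiple-of-5 formula 5*((g+2)//5) (grades ending in 7
-- kept, grades ending in 5 skipped); simpler, same O(n) cost.

-- ===== PORT A =====
-- loop body of A's for-loop (one iteration: the nested if/elif cascade)
def solveBody (a : List Int) (grade : Int) : List Int :=
  if grade ≤ 38 then a ++ [grade]
  else if PySem.Int.mod grade 10 = 7 then a ++ [grade]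
  else if PySem.Int.mod grade 10 = 3 then a ++ [grade + 2]
  else if PySem.Int.mod grade 10 < 5 then
    let grade :=
      if PySem.Int.mod grade 5 < 3 then grade - PySem.Int.mod grade 5
      else if PySem.Int.mod grade 5 > 3 then grade + 1
      else grade
    a ++ [grade]
  else if PySem.Int.mod grade 10 > 5 then
    let grade :=
      if PySem.Int.mod grade 5 < 3 then grade - PySem.Int.mod grade 5
      else if PySem.Int.mod grade 5 > 3 then grade + 1
      else if PySem.Int.mod grade 5 = 3 then grade + 2
      else grade
    a ++ [grade]
  else a

def solve (grades : List Int) : List Int :=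
  grades.foldl solveBody []

-- ===== PORT B =====
def adjustB (g : Int) : Option Int :=
  if g ≤ 38 || PySem.Int.mod g 10 = 7 then some g
  else if PySem.Int.mod g 10 = 5 then none
  else some (5 * PySem.Int.floordiv (g + 2) 5)

def solve_alt (grades : List Int) : List Int :=
  grades.foldl
    (fun out g => match adjustB g with
      | some r => out ++ [r]
      | none => out) []

-- ===== PRECONDITION & SPEC =====
def Spec_solve (grades : List Int) (out : List Int) : Prop := out = solve_alt grades
instance (grades : List Int) (out : List Int) : Decidable (Spec_solve grades out) := by unfold Spec_solve; infer_instance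

-- ===== CLAIM (what is proved, stated in full; the proofs are below) =====
def Claim_equal_solve : Prop := ∀ (grades : List Int), Dom_solve grades → Spec_solve grades (solve grades)

-- ===== LEMMAS AND PROOFS =====

-- the list A appends for one grade
def stepA (grade : Int) : List Int :=
  if grade ≤ 38 then [grade]
  else if PySem.Int.mod grade 10 = 7 then [grade]
  else if PySem.Int.mod grade 10 = 3 then [grade + 2]
  else if PySem.Int.mod grade 10 < 5 then
    [if PySem.Int.mod grade 5 < 3 then grade - PySem.Int.mod grade 5
     else if PySem.Int.mod grade 5 > 3 then grade + 1
     else grade]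
  else if PySem.Int.mod grade 10 > 5 then
    [if PySem.Int.mod grade 5 < 3 then grade - PySem.Int.mod grade 5
     else if PySem.Int.mod grade 5 > 3 then grade + 1
     else if PySem.Int.mod grade 5 = 3 then grade + 2
     else grade]
  else []

-- the list B contributes for one grade
def stepB (g : Int) : List Int := (adjustB g).toList

lemma solveBody_eq (a : List Int) (g : Int) : solveBody a g = a ++ stepA g := by
  unfold solveBody stepA
  split_ifs <;> simp

lemma solve_eq_flatMap (grades : List Int) : solve grades = grades.flatMap stepA := by
  rw [solve, funext (fun a => funext (solveBody_eq a)),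
      PySem.List.foldl_append_eq_flatMap, List.nil_append]

lemma solve_alt_eq_flatMap (grades : List Int) :
    solve_alt grades = grades.flatMap stepB := by
  have h : ∀ (out : List Int) (g : Int),
      (match adjustB g with
        | some r => out ++ [r]
        | none => out) = out ++ stepB g := by
    intro out g
    unfold stepB
    cases adjustB g <;> simp
  rw [solve_alt, funext (fun a => funext (h a)),
      PySem.List.foldl_append_eq_flatMap, List.nil_append]

lemma step_eq (g : Int) : stepA g = stepB g := by
  unfold stepA stepB adjustB
  by_cases h1 : g ≤ 38
  · simp [h1]
  · rw [PySem.Int.mod_eq_emod_of_pos (a := g) (b := 10) (by norm_num),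
        PySem.Int.mod_eq_emod_of_pos (a := g) (b := 5) (by norm_num),
        PySem.Int.floordiv_eq_ediv_of_pos (a := g + 2) (b := 5) (by norm_num)]
    have h5 : g % 5 = (g % 10) % 5 := (Int.emod_emod_of_dvd g (by norm_num)).symm
    have hdiv : 5 * ((g + 2) / 5) = (g + 2) - (g + 2) % 5 := by
      have := Int.mul_ediv_add_emod (g + 2) 5
      omega
    have h52 : (g + 2) % 5 = (g % 10 + 2) % 5 := by
      conv_lhs => rw [Int.add_emod, h5]
      rw [Int.add_emod (g % 10) 2]
    rw [h5, hdiv, h52]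
    have hr0 : 0 ≤ g % 10 := Int.emod_nonneg g (by norm_num)
    have hr1 : g % 10 < 10 := Int.emod_lt_of_pos g (by norm_num)
    generalize g % 10 = r at hr0 hr1 ⊢
    interval_cases r <;> simp [h1] <;> ring_nf

-- ===== VERDICT (by name: the statement is the Claim_ definition above) =====
theorem solve_spec : Claim_equal_solve := by
  intro grades _
  unfold Spec_solve
  rw [solve_eq_flatMap, solve_alt_eq_flatMap]
  exact List.flatMap_congr (fun g _ => step_eq g)
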